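-- pv_equiv track=rewrite | github.com/val-is/advent-of-code | 2021/day23.py | can_enter_home
-- ===== SOURCE A (Python) =====
-- ROOMS = {(3,2): "A", (3,3): "A", (3,4): "A", (3,5): "A",
--         (5,2): "B", (5,3): "B", (5,4): "B", (5,5): "B",
--         (7,2): "C", (7,3): "C", (7,4): "C", (7,5): "C",
--         (9,2): "D", (9,3): "D", (9,4): "D", (9,5): "D"
--         }
--
-- def can_enter_home(tile, pod, room_pods, waiting_pods):
--     # None or (tile, dist_horiz+depth)
--     pod_room = [i for i in ROOMS if ROOMS[i] == pod]
--     empty_in_room = []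
--     filled_in_room = []
--     for i in pod_room:
--         if room_pods[i] != pod and room_pods[i] != " ":
--             return None, None
--         elif room_pods[i] == " ":
--             empty_in_room.append(i)
--         else:
--             filled_in_room.append(i)
--     for i in filled_in_room:
--         empty_in_room = [j for j in empty_in_room if j[1] < i[1]]
--     if len(empty_in_room) == 0:
--         return None, None
--     target = sorted(empty_in_room, key=lambda x:x[1])[-1]
--     dist = abs(target[0]-tile[0])+(target[1]-1)
--     return target, dist
-- ===== SOURCE B (Python) =====
-- def can_enter_home(tile, pod, room_pods, waiting_pods):
--     col = {"A": 3, "B": 5, "C": 7, "D": 9}.get(pod)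
--     if col is None:
--         return None, None
--     deepest = None
--     blocked = False
--     for row in (2, 3, 4, 5):
--         v = room_pods[(col, row)]
--         if v == pod:
--             blocked = True
--         elif v == " ":
--             if not blocked:
--                 deepest = row
--         else:
--             return None, None
--     if deepest is None:
--         return None, None
--     return (col, deepest), abs(col - tile[0]) + (deepest - 1)
-- ===== Notes on version B (the rewrite author's own statement) =====
-- stated objective: simpler
-- what changed: Replaces A's collect-empties-and-filled lists, repeated per-filled refiltering and final sort with a single forward pass over the four room rows that tracks the deepest empty tile seen before the first correctly-placed pod.
import Mathlib
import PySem

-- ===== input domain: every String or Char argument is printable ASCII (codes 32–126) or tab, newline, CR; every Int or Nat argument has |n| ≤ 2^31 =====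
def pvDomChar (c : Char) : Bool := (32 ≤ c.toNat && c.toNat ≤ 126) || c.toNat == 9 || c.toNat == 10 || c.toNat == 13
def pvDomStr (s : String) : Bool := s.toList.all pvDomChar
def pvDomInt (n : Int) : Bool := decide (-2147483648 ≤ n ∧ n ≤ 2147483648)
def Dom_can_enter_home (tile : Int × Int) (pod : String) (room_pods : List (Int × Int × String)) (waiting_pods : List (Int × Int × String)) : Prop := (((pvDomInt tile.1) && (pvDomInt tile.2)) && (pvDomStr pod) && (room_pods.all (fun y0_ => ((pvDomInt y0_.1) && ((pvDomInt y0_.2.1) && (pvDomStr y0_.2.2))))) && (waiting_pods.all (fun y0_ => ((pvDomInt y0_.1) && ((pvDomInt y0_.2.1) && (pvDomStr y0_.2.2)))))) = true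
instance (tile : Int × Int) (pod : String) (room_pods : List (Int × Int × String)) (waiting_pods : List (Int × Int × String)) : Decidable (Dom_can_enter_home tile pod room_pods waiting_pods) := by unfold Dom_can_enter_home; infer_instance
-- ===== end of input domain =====

-- B replaces A's list collection, per-filled refiltering and sort with one forward pass
-- that records the deepest empty tile seen before the first correct pod (objective: simpler).
-- Equivalence is about return values; neither program mutates its arguments.

-- ===== PORT A =====

-- room_pods[(c,r)] : first-match dict lookup; on a missing key Python raises KeyError
-- (those inputs are excluded by Pre_), here it returns " ".
def rpGet (room_pods : List (Int × Int × String)) (c r : Int) : String :=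
  match room_pods.find? (fun e => e.1 == c && e.2.1 == r) with
  | some e => e.2.2
  | none => " "

def ROOMS : List ((Int × Int) × String) :=
  [((3,2),"A"), ((3,3),"A"), ((3,4),"A"), ((3,5),"A"),
   ((5,2),"B"), ((5,3),"B"), ((5,4),"B"), ((5,5),"B"),
   ((7,2),"C"), ((7,3),"C"), ((7,4),"C"), ((7,5),"C"),
   ((9,2),"D"), ((9,3),"D"), ((9,4),"D"), ((9,5),"D")]

-- the first loop: returns none on the early 'return None, None', else (empty_in_room, filled_in_room)
def ceLoop1 (room_pods : List (Int × Int × String)) (pod : String) :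
    List (Int × Int) → List (Int × Int) → List (Int × Int) → Option (List (Int × Int) × List (Int × Int))
  | [], e, f => some (e, f)
  | i :: rest, e, f =>
      if rpGet room_pods i.1 i.2 ≠ pod ∧ rpGet room_pods i.1 i.2 ≠ " " then none
      else if rpGet room_pods i.1 i.2 = " " then ceLoop1 room_pods pod rest (e ++ [i]) f
      else ceLoop1 room_pods pod rest e (f ++ [i])

def can_enter_home (tile : Int × Int) (pod : String) (room_pods : List (Int × Int × String)) (waiting_pods : List (Int × Int × String)) : (Option (Int × Int)) × Option Int :=
  let pod_room := (ROOMS.filter (fun p => p.2 == pod)).map Prod.fst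
  match ceLoop1 room_pods pod pod_room [] [] with
  | none => (none, none)
  | some (e, f) =>
    let e := f.foldl (fun acc i => acc.filter (fun j => decide (j.2 < i.2))) e
    if e.length = 0 then (none, none)
    else
      match (PySem.List.sorted e (fun x => x.2)).getLast? with
      | none => (none, none)   -- unreachable: e ≠ []
      | some target => (some target, some (|target.1 - tile.1| + (target.2 - 1)))

-- ===== PORT B =====

def colOf? (pod : String) : Option Int :=
  (PySem.Dict.mk [("A", (3:Int)), ("B", 5), ("C", 7), ("D", 9)]).get? pod

-- single forward pass over rows 2..5: none = early return; some deepest? otherwise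
def ceAltLoop (room_pods : List (Int × Int × String)) (pod : String) (c : Int) :
    List Int → Bool → Option Int → Option (Option Int)
  | [], _, deepest => some deepest
  | r :: rest, blocked, deepest =>
      if rpGet room_pods c r = pod then ceAltLoop room_pods pod c rest true deepest
      else if rpGet room_pods c r = " " then
        ceAltLoop room_pods pod c rest blocked (if blocked then deepest else some r)
      else none

def can_enter_home_alt (tile : Int × Int) (pod : String) (room_pods : List (Int × Int × String)) (waiting_pods : List (Int × Int × String)) : (Option (Int × Int)) × Option Int :=
  match colOf? pod with
  | none => (none, none)
  | some c =>
    match ceAltLoop room_pods pod c [2, 3, 4, 5] false none with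
    | none => (none, none)
    | some none => (none, none)
    | some (some d) => (some (c, d), some (|c - tile.1| + (d - 1)))

-- ===== PRECONDITION & SPEC =====
-- Pre_ excludes exactly the inputs where Python A raises KeyError: pod names a room but
-- room_pods is missing one of that room's four tiles.
def Pre_can_enter_home (tile : Int × Int) (pod : String) (room_pods : List (Int × Int × String)) (waiting_pods : List (Int × Int × String)) : Prop :=
  ∀ p ∈ ROOMS, p.2 = pod → (room_pods.find? (fun e => e.1 == p.1.1 && e.2.1 == p.1.2)).isSome

instance (tile : Int × Int) (pod : String) (room_pods : List (Int × Int × String)) (waiting_pods : List (Int × Int × String)) : Decidable (Pre_can_enter_home tile pod room_pods waiting_pods) := by unfold Pre_can_enter_home; infer_instance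

def pvWitness_can_enter_home : (Int × Int) × String × (List (Int × Int × String)) × (List (Int × Int × String)) :=
  ((1, 1), "B", [(5, 2, " "), (5, 3, " "), (5, 4, "B"), (5, 5, "B")], [])

def Spec_can_enter_home (tile : Int × Int) (pod : String) (room_pods : List (Int × Int × String)) (waiting_pods : List (Int × Int × String)) (out : (Option (Int × Int)) × Option Int) : Prop := out = can_enter_home_alt tile pod room_pods waiting_pods
instance (tile : Int × Int) (pod : String) (room_pods : List (Int × Int × String)) (waiting_pods : List (Int × Int × String)) (out : (Option (Int × Int)) × Option Int) : Decidable (Spec_can_enter_home tile pod room_pods waiting_pods out) := by unfold Spec_can_enter_home; infer_instance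

-- ===== CLAIM (what is proved, stated in full; the proofs are below) =====
def Claim_equal_can_enter_home : Prop := ∀ (tile : Int × Int) (pod : String) (room_pods : List (Int × Int × String)) (waiting_pods : List (Int × Int × String)), Dom_can_enter_home tile pod room_pods waiting_pods → Pre_can_enter_home tile pod room_pods waiting_pods → Spec_can_enter_home tile pod room_pods waiting_pods (can_enter_home tile pod room_pods waiting_pods)

-- ===== LEMMAS AND PROOFS =====

-- both sides, for a fixed room column c, are the same function of the four lookup values
theorem ce_core (tile : Int × Int) (pod : String) (c : Int) (room_pods : List (Int × Int × String))
    (hpod : pod ≠ " ") :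
    (match ceLoop1 room_pods pod [(c,2),(c,3),(c,4),(c,5)] [] [] with
     | none => ((none, none) : (Option (Int × Int)) × Option Int)
     | some (e, f) =>
       let e := f.foldl (fun acc i => acc.filter (fun j => decide (j.2 < i.2))) e
       if e.length = 0 then (none, none)
       else
         match (PySem.List.sorted e (fun x => x.2)).getLast? with
         | none => (none, none)
         | some target => (some target, some (|target.1 - tile.1| + (target.2 - 1)))) =
    (match ceAltLoop room_pods pod c [2, 3, 4, 5] false none with
     | none => ((none, none) : (Option (Int × Int)) × Option Int)
     | some none => (none, none)
     | some (some d) => (some (c, d), some (|c - tile.1| + (d - 1)))) := by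
  simp only [ceLoop1, ceAltLoop]
  generalize rpGet room_pods c 2 = v2
  generalize rpGet room_pods c 3 = v3
  generalize rpGet room_pods c 4 = v4
  generalize rpGet room_pods c 5 = v5
  by_cases h2 : v2 = pod <;> by_cases h2' : v2 = " " <;>
  by_cases h3 : v3 = pod <;> by_cases h3' : v3 = " " <;>
  by_cases h4 : v4 = pod <;> by_cases h4' : v4 = " " <;>
  by_cases h5 : v5 = pod <;> by_cases h5' : v5 = " " <;>
    simp_all [PySem.List.sorted, PySem.List.insertBy]

-- ===== VERDICT (by name: the statement is the Claim_ definition above) =====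
theorem can_enter_home_spec : Claim_equal_can_enter_home := by
  intro tile pod room_pods waiting_pods _ _
  unfold Spec_can_enter_home can_enter_home can_enter_home_alt
  by_cases hA : pod = "A"
  · subst hA
    have h := ce_core tile "A" 3 room_pods (by decide)
    simpa [ROOMS, colOf?] using h
  by_cases hB : pod = "B"
  · subst hB
    have h := ce_core tile "B" 5 room_pods (by decide)
    simpa [ROOMS, colOf?] using h
  by_cases hC : pod = "C"
  · subst hC
    have h := ce_core tile "C" 7 room_pods (by decide)
    simpa [ROOMS, colOf?] using h
  by_cases hD : pod = "D"
  · subst hD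
    have h := ce_core tile "D" 9 room_pods (by decide)
    simpa [ROOMS, colOf?] using h
  · simp [ROOMS, colOf?, PySem.Dict.get?, ceLoop1,
      Ne.symm hA, Ne.symm hB, Ne.symm hC, Ne.symm hD]
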